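-- pv_equiv track=rewrite | github.com/michalfedyna/semble | src/semble/ranking/boosting.py | _count_keyword_matches
-- ===== SOURCE A (Python) =====
-- def _count_keyword_matches(keywords: set[str], parts: set[str]) -> int:
--     """Count query keywords that match path parts, allowing prefix overlap (min 3 chars)."""
--     exact = keywords & parts
--     if len(exact) == len(keywords):
--         return len(exact)
--     n_matches = len(exact)
--     for keyword in keywords - exact:
--         for part in parts:
--             shorter, longer = (keyword, part) if len(keyword) <= len(part) else (part, keyword)
--             if len(shorter) >= 3 and longer.startswith(shorter):
--                 n_matches += 1
--                 break
--     return n_matches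
-- ===== SOURCE B (Python) =====
-- def _count_keyword_matches(keywords: set[str], parts: set[str]) -> int:
--     """Count query keywords that match path parts, allowing prefix overlap (min 3 chars)."""
--     part_set = set(parts)
--     # index every prefix (length >= 3) of every part, including the part itself
--     prefixes = set()
--     for p in part_set:
--         for i in range(3, len(p) + 1):
--             prefixes.add(p[:i])
--     count = 0
--     for k in set(keywords):
--         if k in part_set:
--             count += 1                 # exact match (any length)
--         elif len(k) >= 3 and k in prefixes:
--             count += 1                 # keyword is a prefix of some part
--         elif any(k[:i] in part_set for i in range(3, len(k))):
--             count += 1                 # some part is a proper prefix of the keyword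
--     return count
-- ===== Notes on version B (the rewrite author's own statement) =====
-- stated objective: faster
-- what changed: Replaces A's nested scan (every unmatched keyword against every part with a startswith test) by a hash index: a set of all length>=3 prefixes of the parts built once, so each keyword is answered by O(len) set lookups instead of a pass over all parts.
import Mathlib
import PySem

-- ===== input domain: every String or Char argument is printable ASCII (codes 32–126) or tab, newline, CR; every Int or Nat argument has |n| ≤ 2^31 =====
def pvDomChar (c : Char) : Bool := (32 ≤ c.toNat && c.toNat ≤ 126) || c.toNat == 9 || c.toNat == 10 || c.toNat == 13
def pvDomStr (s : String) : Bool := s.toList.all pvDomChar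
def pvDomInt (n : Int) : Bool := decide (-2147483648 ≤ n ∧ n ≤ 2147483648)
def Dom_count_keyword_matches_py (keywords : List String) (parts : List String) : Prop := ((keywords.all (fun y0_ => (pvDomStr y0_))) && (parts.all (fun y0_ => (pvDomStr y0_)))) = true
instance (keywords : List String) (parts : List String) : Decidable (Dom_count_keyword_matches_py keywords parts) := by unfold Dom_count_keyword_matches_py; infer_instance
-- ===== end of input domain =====

-- B replaces A's keyword×part nested scan by a one-pass hash index of all length≥3 prefixes of the parts,
-- answering each keyword by set lookups (objective: faster, asymptotically O((K+P)·L) vs O(K·P·L)).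

-- ===== PORT A =====
-- loop body of A: pick (shorter, longer) and test the min-3-chars prefix overlap
def pvOverlap (keyword part : String) : Bool :=
  let sl := if PySem.Str.len keyword ≤ PySem.Str.len part then (keyword, part) else (part, keyword)
  decide (3 ≤ PySem.Str.len sl.1) && PySem.Str.startswith sl.2 sl.1

-- 'for part in parts: … break' — first hit stops the scan
def pvLoopParts (keyword : String) : List String → Bool
  | [] => false
  | part :: rest => if pvOverlap keyword part then true else pvLoopParts keyword rest

def count_keyword_matches_py (keywords : List String) (parts : List String) : Int :=
  let kset := PySem.Set.ofList keywords
  let pset := PySem.Set.ofList parts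
  let exact := PySem.Set.inter kset pset
  if exact.length = kset.length then (exact.length : Int)
  else
    (PySem.Set.diff kset exact).foldl
      (fun n keyword => if pvLoopParts keyword pset then n + 1 else n)
      (exact.length : Int)

-- ===== PORT B =====
-- all prefixes (length ≥ 3, including the part itself) of every part, as one set
def pvPrefixSet (parts : List String) : PySem.Set String :=
  parts.foldl
    (fun s p =>
      (PySem.List.pyRange 3 (PySem.Str.len p + 1) 1).foldl
        (fun s i => PySem.Set.add s (PySem.Str.slice p none (some i))) s)
    PySem.Set.empty

def count_keyword_matches_py_alt (keywords : List String) (parts : List String) : Int :=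
  let pset := PySem.Set.ofList parts
  let prefixes := pvPrefixSet pset
  (PySem.Set.ofList keywords).foldl
    (fun c k =>
      if pset.contains k then c + 1
      else if decide (3 ≤ PySem.Str.len k) && prefixes.contains k then c + 1
      else if (PySem.List.pyRange 3 (PySem.Str.len k) 1).any
          (fun i => pset.contains (PySem.Str.slice k none (some i))) then c + 1
      else c)
    0

-- ===== PRECONDITION & SPEC =====
def Spec_count_keyword_matches_py (keywords : List String) (parts : List String) (out : Int) : Prop := out = count_keyword_matches_py_alt keywords parts
instance (keywords : List String) (parts : List String) (out : Int) : Decidable (Spec_count_keyword_matches_py keywords parts out) := by unfold Spec_count_keyword_matches_py; infer_instance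

-- ===== CLAIM (what is proved, stated in full; the proofs are below) =====
def Claim_equal_count_keyword_matches_py : Prop := ∀ (keywords : List String) (parts : List String), Dom_count_keyword_matches_py keywords parts → Spec_count_keyword_matches_py keywords parts (count_keyword_matches_py keywords parts)

-- ===== LEMMAS AND PROOFS =====

-- counting fold = countP
theorem pv_foldl_count (p : String → Bool) (l : List String) (a : Int) :
    l.foldl (fun n k => if p k then n + 1 else n) a = a + (l.countP p : Int) := by
  induction l generalizing a with
  | nil => simp
  | cons x xs ih =>
    cases hx : p x <;> simp [List.foldl_cons, hx, ih, List.countP_cons] <;> push_cast <;> ring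

-- the break-loop is List.any
theorem pv_loop_eq_any (k : String) (l : List String) :
    pvLoopParts k l = l.any (pvOverlap k) := by
  induction l with
  | nil => rfl
  | cons p rest ih =>
    cases h : pvOverlap k p <;> simp [pvLoopParts, h, ih]

-- characterisation of A's overlap test
theorem pv_overlap_iff (k p : String) :
    pvOverlap k p = true ↔
      (3 ≤ k.toList.length ∧ k.toList <+: p.toList) ∨
      (p.toList.length < k.toList.length ∧ 3 ≤ p.toList.length ∧ p.toList <+: k.toList) := by
  unfold pvOverlap
  by_cases h : PySem.Str.len k ≤ PySem.Str.len p
  · have h' : k.toList.length ≤ p.toList.length := by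
      simpa [PySem.Str.len_eq] using h
    rw [if_pos h]
    simp only [Bool.and_eq_true, decide_eq_true_eq, PySem.Str.startswith_eq,
      PySem.Chars.startswith_iff, PySem.Str.len_eq]
    constructor
    · rintro ⟨h3, hpre⟩
      exact Or.inl ⟨by exact_mod_cast h3, hpre⟩
    · rintro (⟨h3, hpre⟩ | ⟨hlt, h3, hpre⟩)
      · exact ⟨by exact_mod_cast h3, hpre⟩
      · omega
  · have h' : p.toList.length < k.toList.length := by
      have := h
      simp only [PySem.Str.len_eq] at this
      omega
    rw [if_neg h]
    simp only [Bool.and_eq_true, decide_eq_true_eq, PySem.Str.startswith_eq,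
      PySem.Chars.startswith_iff, PySem.Str.len_eq]
    constructor
    · rintro ⟨h3, hpre⟩
      exact Or.inr ⟨h', by exact_mod_cast h3, hpre⟩
    · rintro (⟨h3, hpre⟩ | ⟨hlt, h3, hpre⟩)
      · exact absurd hpre.length_le (by omega)
      · exact ⟨by exact_mod_cast h3, hpre⟩

-- membership in a fold of Set.add
theorem pv_mem_foldl_add {β : Type} (g : β → String) (l : List β) (s : PySem.Set String) (x : String) :
    x ∈ l.foldl (fun s i => PySem.Set.add s (g i)) s ↔ x ∈ s ∨ ∃ i ∈ l, g i = x := by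
  induction l generalizing s with
  | nil => simp
  | cons b bs ih =>
    simp only [List.foldl_cons, ih, PySem.Set.mem_add, List.mem_cons]
    constructor
    · rintro ((hx | hx) | ⟨i, hi, he⟩)
      · exact Or.inl hx
      · exact Or.inr ⟨b, Or.inl rfl, hx.symm⟩
      · exact Or.inr ⟨i, Or.inr hi, he⟩
    · rintro (hx | ⟨i, (rfl | hi), he⟩)
      · exact Or.inl (Or.inl hx)
      · exact Or.inl (Or.inr he.symm)
      · exact Or.inr ⟨i, hi, he⟩

-- membership in the prefix index
theorem pv_mem_prefixSet (ps : List String) (x : String) :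
    x ∈ pvPrefixSet ps ↔
      ∃ p ∈ ps, ∃ i : Int, 3 ≤ i ∧ i < PySem.Str.len p + 1 ∧ PySem.Str.slice p none (some i) = x := by
  unfold pvPrefixSet
  suffices h : ∀ (s : PySem.Set String),
      x ∈ ps.foldl (fun s p => (PySem.List.pyRange 3 (PySem.Str.len p + 1) 1).foldl
        (fun s i => PySem.Set.add s (PySem.Str.slice p none (some i))) s) s ↔
      x ∈ s ∨ ∃ p ∈ ps, ∃ i : Int, 3 ≤ i ∧ i < PySem.Str.len p + 1 ∧ PySem.Str.slice p none (some i) = x by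
    simpa [PySem.Set.empty] using h PySem.Set.empty
  induction ps with
  | nil => simp
  | cons p rest ih =>
    intro s
    simp only [List.foldl_cons, ih, pv_mem_foldl_add, PySem.List.mem_pyRange_one, List.mem_cons]
    constructor
    · rintro ((hx | ⟨i, ⟨h3, hlt⟩, hsl⟩) | ⟨q, hq, i, h3, hlt, hsl⟩)
      · exact Or.inl hx
      · exact Or.inr ⟨p, Or.inl rfl, i, h3, hlt, hsl⟩
      · exact Or.inr ⟨q, Or.inr hq, i, h3, hlt, hsl⟩
    · rintro (hx | ⟨q, (rfl | hq), i, h3, hlt, hsl⟩)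
      · exact Or.inl (Or.inl hx)
      · exact Or.inl (Or.inr ⟨i, ⟨h3, hlt⟩, hsl⟩)
      · exact Or.inr ⟨q, hq, i, h3, hlt, hsl⟩

-- a string slice s[:i] (0 ≤ i) is take on toList
theorem pv_slice_take (s : String) (i : Int) (h : 0 ≤ i) :
    PySem.Str.slice s none (some i) = String.ofList (s.toList.take i.toNat) := by
  simp [PySem.Str.slice, PySem.Chars.slice_eq_listSlice, PySem.List.slice_to s.toList h]

-- crux: A's scan over the parts equals B's two prefix-index lookups
theorem pv_any_overlap_eq (parts : List String) (k : String) :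
    (PySem.Set.ofList parts).any (pvOverlap k) =
      (decide (3 ≤ PySem.Str.len k) && (pvPrefixSet (PySem.Set.ofList parts)).contains k ||
       (PySem.List.pyRange 3 (PySem.Str.len k) 1).any
         (fun i => (PySem.Set.ofList parts).contains (PySem.Str.slice k none (some i)))) := by
  rw [Bool.eq_iff_iff]
  simp only [List.any_eq_true, Bool.or_eq_true, Bool.and_eq_true, decide_eq_true_eq,
    PySem.Set.contains_iff, pv_mem_prefixSet, PySem.Set.mem_ofList, pv_overlap_iff,
    PySem.List.mem_pyRange_one, PySem.Str.len_eq]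
  constructor
  · rintro ⟨p, hp, (⟨h3, hpre⟩ | ⟨hlt, h3, hpre⟩)⟩
    · refine Or.inl ⟨by exact_mod_cast h3, p, hp, (k.toList.length : Int), by exact_mod_cast h3,
        by exact_mod_cast Nat.lt_succ_of_le hpre.length_le, ?_⟩
      rw [pv_slice_take _ _ (by positivity)]
      simp only [Int.toNat_natCast]
      rw [← List.prefix_iff_eq_take.mp hpre]
      simp
    · have hsl : PySem.Str.slice k none (some (p.toList.length : Int)) = p := by
        rw [pv_slice_take _ _ (by positivity)]
        simp only [Int.toNat_natCast]
        rw [← List.prefix_iff_eq_take.mp hpre]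
        simp
      exact Or.inr ⟨(p.toList.length : Int), ⟨by exact_mod_cast h3, by exact_mod_cast hlt⟩,
        by rw [hsl]; exact hp⟩
  · rintro (⟨h3, p, hp, i, hi3, hilt, hsl⟩ | ⟨i, ⟨hi3, hilt⟩, hmem⟩)
    · have h0 : (0:Int) ≤ i := by omega
      rw [pv_slice_take _ _ h0] at hsl
      have hk : k.toList = p.toList.take i.toNat := by
        rw [← hsl]; simp
      refine ⟨p, hp, Or.inl ⟨by exact_mod_cast h3, ?_⟩⟩
      rw [hk]; exact List.take_prefix _ _
    · have h0 : (0:Int) ≤ i := by omega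
      rw [pv_slice_take _ _ h0] at hmem
      refine ⟨_, hmem, Or.inr ⟨?_, ?_, ?_⟩⟩
      · simp only [String.toList_ofList, List.length_take]
        omega
      · simp only [String.toList_ofList, List.length_take]
        omega
      · simp only [String.toList_ofList]
        exact List.take_prefix _ _
  
-- countP of a disjunction splits
theorem pv_countP_or (p q : String → Bool) (l : List String) :
    l.countP (fun x => p x || q x) = l.countP p + l.countP (fun x => !p x && q x) := by
  induction l with
  | nil => simp
  | cons x xs ih =>
    cases hp : p x <;> cases hq : q x <;> simp [List.countP_cons, hp, hq, ih] <;> omega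

-- A computes countP of (exact-or-overlap) over the deduplicated keywords
theorem pv_A_eq (keywords parts : List String) :
    count_keyword_matches_py keywords parts =
      ((PySem.Set.ofList keywords).countP
        (fun k => (PySem.Set.ofList parts).contains k || pvLoopParts k (PySem.Set.ofList parts)) : Int) := by
  unfold count_keyword_matches_py
  set kset := PySem.Set.ofList keywords with hk
  set pset := PySem.Set.ofList parts with hps
  have hinter : PySem.Set.inter kset pset = kset.filter (fun k => pset.contains k) := rfl
  by_cases h : (PySem.Set.inter kset pset).length = kset.length
  · rw [if_pos h]
    have h' := h
    rw [hinter, List.length_filter_eq_length_iff] at h'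
    have hcount : kset.countP (fun k => pset.contains k || pvLoopParts k pset) = kset.length := by
      rw [List.countP_eq_length]
      intro a ha
      show (pset.contains a || pvLoopParts a pset) = true
      rw [Bool.or_eq_true]
      exact Or.inl (h' a ha)
    rw [hcount]
    exact_mod_cast h
  · rw [if_neg h]
    have hdiff : PySem.Set.diff kset (PySem.Set.inter kset pset) =
        kset.filter (fun k => !pset.contains k) := by
      simp only [PySem.Set.diff, hinter]
      apply List.filter_congr
      intro a ha
      congr 1
      rw [Bool.eq_iff_iff, PySem.Set.contains_iff, PySem.Set.contains_iff, List.mem_filter]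
      constructor
      · intro hh
        rw [← PySem.Set.contains_iff]
        exact hh.2
      · intro hh
        rw [← PySem.Set.contains_iff] at hh
        exact ⟨ha, hh⟩
    have hexlen : (PySem.Set.inter kset pset).length = kset.countP (fun k => pset.contains k) := by
      rw [hinter]
      exact List.countP_eq_length_filter.symm
    rw [hdiff, pv_foldl_count, hexlen]
    simp only [List.countP_filter,
      pv_countP_or (fun k => pset.contains k) (fun k => pvLoopParts k pset) kset]
    have hswap : List.countP (fun a => pvLoopParts a pset && !pset.contains a) kset =
        List.countP (fun x => !pset.contains x && pvLoopParts x pset) kset :=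
      List.countP_congr (fun x _ => by cases hc : pset.contains x <;> simp [hc])
    rw [hswap]
    push_cast
    ring

-- B computes countP of its three-branch test over the deduplicated keywords
theorem pv_B_eq (keywords parts : List String) :
    count_keyword_matches_py_alt keywords parts =
      ((PySem.Set.ofList keywords).countP
        (fun k => (PySem.Set.ofList parts).contains k ||
          (decide (3 ≤ PySem.Str.len k) && (pvPrefixSet (PySem.Set.ofList parts)).contains k ||
           (PySem.List.pyRange 3 (PySem.Str.len k) 1).any
             (fun i => (PySem.Set.ofList parts).contains (PySem.Str.slice k none (some i))))) : Int) := by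
  have hstep : (fun (c : Int) (k : String) =>
      if (PySem.Set.ofList parts).contains k then c + 1
      else if decide (3 ≤ PySem.Str.len k) && (pvPrefixSet (PySem.Set.ofList parts)).contains k then c + 1
      else if (PySem.List.pyRange 3 (PySem.Str.len k) 1).any
          (fun i => (PySem.Set.ofList parts).contains (PySem.Str.slice k none (some i))) then c + 1
      else c) =
      (fun (c : Int) (k : String) =>
        if (PySem.Set.ofList parts).contains k ||
            (decide (3 ≤ PySem.Str.len k) && (pvPrefixSet (PySem.Set.ofList parts)).contains k ||
             (PySem.List.pyRange 3 (PySem.Str.len k) 1).any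
               (fun i => (PySem.Set.ofList parts).contains (PySem.Str.slice k none (some i)))) then c + 1
        else c) := by
    funext c k
    cases h1 : (PySem.Set.ofList parts).contains k <;>
      cases h2 : decide (3 ≤ PySem.Str.len k) && (pvPrefixSet (PySem.Set.ofList parts)).contains k <;>
        cases h3 : (PySem.List.pyRange 3 (PySem.Str.len k) 1).any
            (fun i => (PySem.Set.ofList parts).contains (PySem.Str.slice k none (some i))) <;>
          simp [h3]
  simp only [count_keyword_matches_py_alt]
  rw [hstep, pv_foldl_count]
  simp

-- ===== VERDICT (by name: the statement is the Claim_ definition above) =====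
theorem count_keyword_matches_py_spec : Claim_equal_count_keyword_matches_py := by
  intro keywords parts _
  unfold Spec_count_keyword_matches_py
  rw [pv_A_eq, pv_B_eq]
  congr 1
  apply List.countP_congr
  intro k _
  rw [pv_loop_eq_any, pv_any_overlap_eq]
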